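-- pv_equiv track=rewrite | github.com/ChinomnsoC/data-structure-algorithms | hash_map/ip_address.py | most_frequent_ip
-- ===== SOURCE A (Python) =====
-- def most_frequent_ip(lines: list) -> str:
--     if not lines:
--         return 0
--
--     ip_frequency_map = {}
--
--     for line in lines:
--         ip_address = line.split(" ")[0]
--         # if ip_address not in map
--         if ip_address not in ip_frequency_map:
--             ip_frequency_map[ip_address] = 1
--             continue
--         # add ip address to map, with freq 1
--         else:
--             ip_frequency_map[ip_address] += 1
--         # else increase frequency by plus 1
--     # sort the map, return a formatted string
--     # "10.0.0.1,10.0.0.2"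
--     max_freq = max(ip_frequency_map.values())
--     ties = []
--     for key, value in ip_frequency_map.items():
--
--         if value == max_freq:
--             ties.append(key)
--
--     return ",".join(sorted(ties))
-- ===== SOURCE B (Python) =====
-- def most_frequent_ip(lines: list) -> str:
--     if not lines:
--         return ""
--     ips = sorted(line.split(" ")[0] for line in lines)
--     groups = []
--     cur, cnt = ips[0], 1
--     for ip in ips[1:]:
--         if ip == cur:
--             cnt += 1
--         else:
--             groups.append((cur, cnt))
--             cur, cnt = ip, 1
--     groups.append((cur, cnt))
--     best = max(c for _, c in groups)
--     return ",".join(ip for ip, c in groups if c == best)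
-- ===== Notes on version B (the rewrite author's own statement) =====
-- stated objective: alternative
-- what changed: Replaces the hash-map counting (dict build, max over values, filter pass, final sort of ties) by a sort-then-group strategy: sort the extracted IPs once, collapse adjacent runs into (ip,count) groups in a single pass, then take the groups with maximal count - the ties come out already in sorted order.
-- outside the precondition, e.g. on most_frequent_ip([]): A returns 0, B returns ''
import Mathlib
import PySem

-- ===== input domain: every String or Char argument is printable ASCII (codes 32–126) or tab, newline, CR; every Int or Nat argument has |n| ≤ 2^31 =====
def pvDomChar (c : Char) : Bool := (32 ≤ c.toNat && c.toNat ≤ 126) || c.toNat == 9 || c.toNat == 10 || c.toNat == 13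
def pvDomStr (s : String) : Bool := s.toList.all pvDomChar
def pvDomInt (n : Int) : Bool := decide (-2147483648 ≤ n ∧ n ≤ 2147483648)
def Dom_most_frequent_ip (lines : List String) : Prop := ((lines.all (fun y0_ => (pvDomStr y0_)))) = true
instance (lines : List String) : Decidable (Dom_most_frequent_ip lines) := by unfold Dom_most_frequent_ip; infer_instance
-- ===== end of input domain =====

-- B replaces A's hash-map counting by sort-then-group over the extracted IPs; objective: alternative (same result, different algorithm).

-- ===== PORT A =====
-- line.split(" ")[0]: the separator " " is nonempty, so split? is `some` of a nonempty
-- list and the [0]-indexing is exactly its head (never raises).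
def ipOf (line : String) : String :=
  ((PySem.Str.split? line " ").getD []).headD ""

def most_frequent_ip (lines : List String) : String :=
  if lines = [] then ""   -- Python A returns the int 0 here (not a str); excluded by Pre_
  else
    let d := lines.foldl (fun (d : PySem.Dict String Int) line =>
      let ip := ipOf line
      if d.contains ip = false then d.insert ip 1
      else d.modify ip 0 (fun v => v + 1)) PySem.Dict.empty
    match PySem.List.max? d.values (fun v => v) with
    | none => ""   -- unreachable: lines ≠ [] so the dict is nonempty
    | some maxFreq =>
      let ties := d.items.foldl
        (fun acc kv => if kv.2 = maxFreq then acc ++ [kv.1] else acc) ([] : List String)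
      PySem.Str.join "," (PySem.List.sorted ties (fun x => x))

-- ===== PORT B =====
-- one step of B's run-collapsing loop over the sorted IP list: state (groups, cur, cnt)
def runStep (st : List (String × Int) × String × Int) (ip : String) :
    List (String × Int) × String × Int :=
  if ip = st.2.1 then (st.1, st.2.1, st.2.2 + 1)
  else (st.1 ++ [(st.2.1, st.2.2)], ip, 1)

def most_frequent_ip_alt (lines : List String) : String :=
  if lines = [] then ""   -- Python B returns "" here; excluded by Pre_ anyway
  else
    let ips := PySem.List.sorted (lines.map ipOf) (fun x => x)
    match ips with
    | [] => ""   -- unreachable: lines ≠ []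
    | x :: rest =>
      let st := rest.foldl runStep ([], x, 1)
      let groups := st.1 ++ [st.2]
      match PySem.List.max? groups (fun g => g.2) with
      | none => ""   -- unreachable: groups ends with st.2
      | some m =>
        PySem.Str.join ","
          ((groups.filter (fun g => decide (g.2 = m.2))).map (fun g => g.1))

-- ===== PRECONDITION & SPEC =====
-- Pre_ excludes only the empty list, on which Python A returns the int 0 — not a value
-- of the declared str return type.
def Pre_most_frequent_ip (lines : List String) : Prop := lines ≠ []
instance (lines : List String) : Decidable (Pre_most_frequent_ip lines) := by
  unfold Pre_most_frequent_ip; infer_instance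

def pvWitness_most_frequent_ip : List String :=
  ["1.1.1.1 GET /a", "2.2.2.2 GET /b", "1.1.1.1 GET /c"]

def Spec_most_frequent_ip (lines : List String) (out : String) : Prop :=
  out = most_frequent_ip_alt lines
instance (lines : List String) (out : String) : Decidable (Spec_most_frequent_ip lines out) := by
  unfold Spec_most_frequent_ip; infer_instance

-- ===== CLAIM (what is proved, stated in full; the proofs are below) =====
def Claim_equal_most_frequent_ip : Prop :=
  ∀ (lines : List String), Dom_most_frequent_ip lines → Pre_most_frequent_ip lines →
    Spec_most_frequent_ip lines (most_frequent_ip lines)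

-- ===== LEMMAS AND PROOFS =====

-- folding Set.add over xs from a state that already starts with a fresh x just carries x in front
lemma foldl_add_cons_of_not_mem {α : Type} [BEq α] [LawfulBEq α] (xs : List α) (x : α)
    (h : x ∉ xs) : ∀ s : List α,
    List.foldl PySem.Set.add (x :: s) xs = x :: List.foldl PySem.Set.add s xs := by
  induction xs with
  | nil => intro s; rfl
  | cons y ys ih =>
    intro s
    have hxy : y ≠ x := fun e => h (e ▸ List.mem_cons_self)
    have hys : x ∉ ys := fun e => h (List.mem_cons_of_mem _ e)
    simp only [List.foldl_cons]
    rw [PySem.Set.add_eq_ite (x :: s) y, PySem.Set.add_eq_ite s y]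
    by_cases hm : y ∈ s
    · simp [hm, hxy, ih hys]
    · simp [hm, hxy, ih hys]

lemma ofList_cons_of_not_mem {α : Type} [BEq α] [LawfulBEq α] (x : α) (xs : List α)
    (h : x ∉ xs) : PySem.Set.ofList (x :: xs) = x :: PySem.Set.ofList xs := by
  rw [PySem.Set.ofList_eq_foldl, PySem.Set.ofList_eq_foldl]
  have : PySem.Set.add [] x = [x] := by simp [PySem.Set.add]
  simp only [List.foldl_cons, this]
  exact foldl_add_cons_of_not_mem xs x h []

-- Set.ofList keeps a subsequence of its input
lemma foldl_add_sublist {α : Type} [BEq α] [LawfulBEq α] (xs : List α) :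
    ∀ s : List α, (List.foldl PySem.Set.add s xs).Sublist (s ++ xs) := by
  induction xs with
  | nil => intro s; simp
  | cons y ys ih =>
    intro s
    simp only [List.foldl_cons]
    refine (ih (PySem.Set.add s y)).trans ?_
    have h1 : (PySem.Set.add s y).Sublist (s ++ [y]) := by
      rw [PySem.Set.add_eq_ite]
      by_cases hm : y ∈ s
      · simp [hm]
      · simp [hm]
    have := h1.append_right ys
    simpa using this
lemma ofList_sublist {α : Type} [BEq α] [LawfulBEq α] (xs : List α) :
    (PySem.Set.ofList xs).Sublist xs := by
  rw [PySem.Set.ofList_eq_foldl]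
  simpa using foldl_add_sublist xs []

-- B's run-collapsing loop over a sorted tail produces exactly one group per distinct
-- element, carrying its total multiplicity
lemma runs_spec (l : List String) : ∀ (cur : String) (cnt : Int) (groups : List (String × Int)),
    (cur :: l).Pairwise (· ≤ ·) →
    (List.foldl runStep (groups, cur, cnt) l).1 ++ [(List.foldl runStep (groups, cur, cnt) l).2] =
      groups ++ (PySem.Set.ofList (cur :: l)).map
        (fun k => (k, (if k = cur then cnt else 0) + (List.count k l : Int))) := by
  induction l with
  | nil =>
    intro cur cnt groups _
    have : PySem.Set.ofList [cur] = [cur] := by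
      rw [PySem.Set.ofList_eq_foldl]; simp [PySem.Set.add]
    simp [this]
  | cons y t ih =>
    intro cur cnt groups hp
    rcases List.pairwise_cons.mp hp with ⟨hcur, hyt⟩
    by_cases hyc : y = cur
    · subst hyc
      have hstep : List.foldl runStep (groups, y, cnt) (y :: t)
          = List.foldl runStep (groups, y, cnt + 1) t := by
        simp [runStep]
      rw [hstep, ih y (cnt + 1) groups hyt]
      have hset : PySem.Set.ofList (y :: y :: t) = PySem.Set.ofList (y :: t) := by
        rw [PySem.Set.ofList_eq_foldl, PySem.Set.ofList_eq_foldl]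
        simp [PySem.Set.add]
      rw [hset]
      congr 1
      apply List.map_congr_left
      intro k _
      by_cases hk : k = y
      · subst hk; simp; ring
      · simp [hk, Ne.symm hk]
    · have hcy : cur < y := lt_of_le_of_ne (hcur y List.mem_cons_self) (Ne.symm hyc)
      have hnot : cur ∉ y :: t := by
        intro hm
        rcases List.mem_cons.mp hm with h | h
        · exact hyc h.symm
        · have := (List.pairwise_cons.mp hyt).1 cur h
          exact absurd (lt_of_lt_of_le hcy this) (lt_irrefl cur)
      have hstep : List.foldl runStep (groups, cur, cnt) (y :: t)
          = List.foldl runStep (groups ++ [(cur, cnt)], y, 1) t := by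
        simp [runStep, hyc]
      rw [hstep, ih y 1 (groups ++ [(cur, cnt)]) hyt,
        ofList_cons_of_not_mem cur (y :: t) hnot]
      have hc0 : List.count cur (y :: t) = 0 := List.count_eq_zero.mpr hnot
      simp only [List.map_cons, List.append_assoc, List.singleton_append]
      congr 2
      · simp [hc0]
      · apply List.map_congr_left
        intro k hk
        have hky : k ∈ y :: t := (PySem.Set.mem_ofList _ _).mp hk
        have hkc : k ≠ cur := fun e => hnot (e ▸ hky)
        by_cases hkyy : k = y
        · subst hkyy; simp [hkc]; ring
        · simp [hkc, hkyy, Ne.symm hkyy]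

-- A's counting loop is the standard counter over the extracted IPs
lemma a_fold_eq_counter (lines : List String) :
    lines.foldl (fun (d : PySem.Dict String Int) line =>
      let ip := ipOf line
      if d.contains ip = false then d.insert ip 1
      else d.modify ip 0 (fun v => v + 1)) PySem.Dict.empty
    = PySem.Dict.counter (lines.map ipOf) := by
  rw [PySem.Dict.counter_eq_foldl, List.foldl_map]
  apply PySem.List.foldl_congr_mem
  intro d line _
  by_cases hc : d.contains (ipOf line) = false
  · simp only [hc, if_true]
    rw [PySem.Dict.modify, PySem.Dict.getD_of_not_contains d 0 hc]
    norm_num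
  · simp [hc]

-- ===== VERDICT (by name: the statement is the Claim_ definition above) =====
theorem most_frequent_ip_spec : Claim_equal_most_frequent_ip := by
  intro lines _ hpre
  unfold Spec_most_frequent_ip
  have hpre' : ¬ (lines = []) := hpre
  simp only [most_frequent_ip, most_frequent_ip_alt, if_neg hpre']
  rw [a_fold_eq_counter]
  -- names
  have hvals : (PySem.Dict.counter (lines.map ipOf)).values
      = (PySem.Set.ofList (lines.map ipOf)).map (fun k => (List.count k (lines.map ipOf) : Int)) := by
    show ((PySem.Dict.counter (lines.map ipOf)).items).map (fun x => x.2) = _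
    rw [PySem.Dict.items_counter, List.map_map]
    simp [Function.comp_def]
  have hipsne : lines.map ipOf ≠ [] := by simpa using hpre'
  -- B side: sorted list is nonempty
  have hsne : PySem.List.sorted (lines.map ipOf) (fun x => x) ≠ [] := by
    rw [Ne, PySem.List.sorted_eq_nil_iff]; exact hipsne
  obtain ⟨x, rest, hxr⟩ := List.exists_cons_of_ne_nil hsne
  rw [hxr]
  dsimp only
  have hperm : (x :: rest).Perm (lines.map ipOf) := by
    rw [← hxr]; exact PySem.List.sorted_perm _ _ _
  have hpair : (x :: rest).Pairwise (· ≤ ·) := by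
    rw [← hxr]; exact PySem.List.sorted_pairwise _ _
  -- the run-collapsing fold produces one (ip, total count) group per distinct ip
  have hgroups :
      (List.foldl runStep ([], x, 1) rest).1 ++ [(List.foldl runStep ([], x, 1) rest).2]
      = (PySem.Set.ofList (x :: rest)).map
          (fun k => (k, (List.count k (lines.map ipOf) : Int))) := by
    rw [runs_spec rest x 1 [] hpair, List.nil_append]
    apply List.map_congr_left
    intro k _
    have : List.count k (lines.map ipOf) = List.count k (x :: rest) := (hperm.count_eq k).symm
    rw [this, List.count_cons]
    by_cases hk : k = x
    · subst hk; simp; ring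
    · simp [hk, Ne.symm hk]
  -- the two Set.ofList's are permutations of each other
  have hKperm : (PySem.Set.ofList (x :: rest)).Perm (PySem.Set.ofList (lines.map ipOf)) := by
    rw [List.perm_ext_iff_of_nodup (PySem.Set.nodup_ofList _) (PySem.Set.nodup_ofList _)]
    intro a
    rw [PySem.Set.mem_ofList, PySem.Set.mem_ofList, hperm.mem_iff]
  -- the distinct sorted ips are strictly increasing
  have hKlt : (PySem.Set.ofList (x :: rest)).Pairwise (· < ·) := by
    have hle : (PySem.Set.ofList (x :: rest)).Pairwise (· ≤ ·) :=
      List.Pairwise.sublist (ofList_sublist _) hpair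
    have hne : (PySem.Set.ofList (x :: rest)).Pairwise (· ≠ ·) := PySem.Set.nodup_ofList _
    exact (hle.and hne).imp (fun h => lt_of_le_of_ne h.1 h.2)
  -- the maxima on both sides exist and agree
  cases hmaxA : PySem.List.max? (PySem.Dict.counter (lines.map ipOf)).values (fun v => v) with
  | none =>
    exfalso
    have := (PySem.List.max?_eq_none_iff _ _).mp hmaxA
    rw [hvals, List.map_eq_nil_iff] at this
    obtain ⟨a, t, ha⟩ := List.exists_cons_of_ne_nil hipsne
    have : a ∈ PySem.Set.ofList (lines.map ipOf) := by
      rw [PySem.Set.mem_ofList, ha]; exact List.mem_cons_self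
    simp_all
  | some M =>
  cases hmaxB : PySem.List.max? ((List.foldl runStep ([], x, 1) rest).1
      ++ [(List.foldl runStep ([], x, 1) rest).2]) (fun g => g.2) with
  | none =>
    exfalso
    have := (PySem.List.max?_eq_none_iff _ _).mp hmaxB
    simp at this
  | some m =>
  have hMm : M = m.2 := by
    apply le_antisymm
    · have hMmem := PySem.List.max?_mem hmaxA
      rw [hvals, List.mem_map] at hMmem
      obtain ⟨k, hkK, rfl⟩ := hMmem
      have hmem : (k, (List.count k (lines.map ipOf) : Int))
          ∈ (List.foldl runStep ([], x, 1) rest).1 ++ [(List.foldl runStep ([], x, 1) rest).2] := by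
        rw [hgroups, List.mem_map]
        exact ⟨k, hKperm.mem_iff.mpr hkK, rfl⟩
      exact PySem.List.max?_isMax hmaxB _ hmem
    · have hmmem := PySem.List.max?_mem hmaxB
      rw [hgroups, List.mem_map] at hmmem
      obtain ⟨k, hkK, rfl⟩ := hmmem
      have hmem : ((List.count k (lines.map ipOf) : Int))
          ∈ (PySem.Dict.counter (lines.map ipOf)).values := by
        rw [hvals, List.mem_map]
        exact ⟨k, hKperm.mem_iff.mp hkK, rfl⟩
      exact PySem.List.max?_isMax hmaxA _ hmem
  dsimp only
  -- ties: A filters the dict items, B filters the groups; both are the distinct ips with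
  -- maximal count, A's then sorted, B's already strictly increasing
  rw [PySem.List.foldl_append_ite (fun kv : String × Int => kv.2 = M) (fun kv => kv.1),
    List.nil_append, PySem.Dict.items_counter, List.filter_map, List.map_map, hgroups,
    List.filter_map, List.map_map, hMm]
  congr 1
  apply PySem.List.sorted_eq_of_perm_of_pairwise_lt
  · exact (hKperm.filter _).map _
  · have : ∀ (L : List String),
        (List.map ((fun kv : String × Int => kv.1) ∘ fun k => (k, (List.count k (lines.map ipOf) : Int)))
          (List.filter ((fun g : String × Int => decide (g.2 = m.2)) ∘ fun k => (k, (List.count k (lines.map ipOf) : Int))) L))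
        = List.filter (fun k => decide ((List.count k (lines.map ipOf) : Int) = m.2)) L := by
      intro L
      simp [Function.comp_def]
    rw [this]
    exact List.Pairwise.sublist List.filter_sublist hKlt
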